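-- pv_equiv track=rewrite | github.com/8n8/trumat | rules.py | remove_space_before_close_bracket
-- ===== SOURCE A (Python) =====
-- def remove_space_before_close_bracket(old):
--     new = ""
--
--     for i, c in enumerate(old):
--         if c == " ":
--             try:
--                 if old[i + 1] == "]" or old[i + 1] == "M":
--                     continue
--
--             except IndexError:
--                 pass
--
--         new += c
--
--     return new, None
-- ===== SOURCE B (Python) =====
-- def remove_space_before_close_bracket(old):
--     return old.replace(" ]", "]").replace(" M", "M"), None
-- ===== Notes on version B (the rewrite author's own statement) =====
-- stated objective: idiomatic
-- what changed: Replaces A's per-character enumerate loop with try/except index lookahead by two staged global str.replace calls (space-bracket then space-M), proved to remove exactly the spaces whose immediate successor is a close bracket or M.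
import Mathlib
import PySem

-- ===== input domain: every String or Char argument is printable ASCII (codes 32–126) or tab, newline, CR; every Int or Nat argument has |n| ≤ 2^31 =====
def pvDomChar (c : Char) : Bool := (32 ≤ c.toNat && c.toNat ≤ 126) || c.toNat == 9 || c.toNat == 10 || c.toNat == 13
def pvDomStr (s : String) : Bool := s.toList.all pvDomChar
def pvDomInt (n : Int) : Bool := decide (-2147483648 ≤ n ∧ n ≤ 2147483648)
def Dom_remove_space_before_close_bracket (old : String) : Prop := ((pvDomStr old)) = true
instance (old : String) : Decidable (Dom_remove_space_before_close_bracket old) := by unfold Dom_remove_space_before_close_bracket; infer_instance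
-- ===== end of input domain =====

-- B replaces A's index-and-peek character loop (with its try/except lookahead) by two
-- staged global string replacements, " ]"->"]" then " M"->"M": no loop, no indexing.
-- objective: idiomatic; same O(n), str.replace does the scanning in C.

-- ===== PORT A =====
def remove_space_before_close_bracket (old : String) : String × Option String :=
  let new : List Char :=
    (PySem.List.enumerate old.toList 0).foldl
      (fun (new : List Char) (ic : Int × Char) =>
        if ic.2 = ' ' then
          match PySem.Str.pyGet? old (ic.1 + 1) with
          | some c2 => if c2 = ']' ∨ c2 = 'M' then new else new ++ [ic.2]
          | none => new ++ [ic.2]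
        else new ++ [ic.2]) []
  (String.ofList new, none)

-- ===== PORT B =====
def remove_space_before_close_bracket_alt (old : String) : String × Option String :=
  (PySem.Str.replace (PySem.Str.replace old " ]" "]") " M" "M", none)

-- ===== PRECONDITION & SPEC =====
def Spec_remove_space_before_close_bracket (old : String) (out : String × Option String) : Prop := out = remove_space_before_close_bracket_alt old
instance (old : String) (out : String × Option String) : Decidable (Spec_remove_space_before_close_bracket old out) := by unfold Spec_remove_space_before_close_bracket; infer_instance

-- ===== CLAIM (what is proved, stated in full; the proofs are below) =====
def Claim_equal_remove_space_before_close_bracket : Prop := ∀ (old : String), Dom_remove_space_before_close_bracket old → Spec_remove_space_before_close_bracket old (remove_space_before_close_bracket old)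

-- ===== LEMMAS AND PROOFS =====

-- Reference function: process the list with one-character lookahead via head?.
def pvLook : List Char → List Char
  | [] => []
  | c :: t =>
      (if c = ' ' ∧ (t.head? = some ']' ∨ t.head? = some 'M') then [] else [c]) ++ pvLook t

-- What one replace of " b" by "b" computes, as a plain recursion.
def pvRep (b : Char) : List Char → List Char
  | c :: d :: t => if c = ' ' ∧ d = b then b :: pvRep b t else c :: pvRep b (d :: t)
  | l => l

-- A's fold over `enumerate t k` (looking up index k+1,… in the full list l) is pvLook t.
theorem pvA_loop (l : List Char) (t : List Char) (k : Nat) (acc : List Char)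
    (ht : l.drop k = t) :
    (PySem.List.enumerate t (k : Int)).foldl
      (fun (new : List Char) (ic : Int × Char) =>
        if ic.2 = ' ' then
          match PySem.List.pyGet? l (ic.1 + 1) with
          | some c2 => if c2 = ']' ∨ c2 = 'M' then new else new ++ [ic.2]
          | none => new ++ [ic.2]
        else new ++ [ic.2]) acc = acc ++ pvLook t := by
  induction t generalizing k acc with
  | nil => simp [PySem.List.enumerate_nil, pvLook]
  | cons c t' ih =>
      have ht' : l.drop (k + 1) = t' := by
        have := congrArg List.tail ht
        simpa [List.tail_drop] using this
      have hnext : PySem.List.pyGet? l ((k : Int) + 1) = t'.head? := by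
        have h1 : PySem.List.pyGet? l ((k : Int) + 1) = l[k + 1]? := by
          have := PySem.List.pyGet?_natCast (xs := l) (n := k + 1)
          simpa [Nat.cast_add] using this
        have h2 : l[k + 1]? = (List.drop (k + 1) l)[0]? := by
          simp [List.getElem?_drop]
        rw [h1, h2, ht']
        cases t' <;> simp
      rw [PySem.List.enumerate_cons, List.foldl_cons]
      have harith : ((k : Int) + 1) = ((k + 1 : Nat) : Int) := by push_cast; ring
      rw [show (PySem.List.enumerate t' ((k : Int) + 1)) = PySem.List.enumerate t' ((k + 1 : Nat) : Int) from by rw [harith]]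
      by_cases hc : c = ' '
      · cases hh : t'.head? with
        | none =>
            simp only [hc, hnext, hh]
            rw [ih (k + 1) _ ht']
            simp [pvLook, hh, List.append_assoc]
        | some d =>
            by_cases hd : d = ']' ∨ d = 'M'
            · simp only [hc, hnext, hh, if_pos hd]
              rw [ih (k + 1) _ ht']
              rcases hd with h | h <;> simp [pvLook, hh, h]
            · simp only [hc, hnext, hh, if_neg hd]
              rw [ih (k + 1) _ ht']
              rw [not_or] at hd
              simp [pvLook, hh, hd.1, hd.2, List.append_assoc]
      · simp only [if_neg hc]
        rw [ih (k + 1) _ ht']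
        simp [pvLook, hc, List.append_assoc]

-- replace.go for the two-character pattern " b" with replacement "b" computes pvRep b.
theorem pvGo_eq (b : Char) (fuel : Nat) (l acc : List Char) (hf : l.length ≤ fuel) :
    PySem.Chars.replace.go [' ', b] [b] fuel l acc = acc.reverse ++ pvRep b l := by
  induction fuel generalizing l acc with
  | zero =>
      have : l = [] := List.length_eq_zero_iff.mp (Nat.le_zero.mp hf)
      subst this
      simp [PySem.Chars.replace.go, pvRep]
  | succ fuel ih =>
      cases l with
      | nil => simp [PySem.Chars.replace.go, pvRep]
      | cons c t =>
          rw [PySem.Chars.replace.go]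
          by_cases hp : List.isPrefixOf [' ', b] (c :: t) = true
          · obtain ⟨c', t', rfl⟩ : ∃ c' t', t = c' :: t' := by
              cases t with
              | nil => simp [List.isPrefixOf] at hp
              | cons c' t' => exact ⟨c', t', rfl⟩
            have hc : c = ' ' ∧ c' = b := by
              have := hp
              simp [List.isPrefixOf] at this
              exact ⟨this.1.symm, this.2.symm⟩
            rw [if_pos hp]
            have ht' : t'.length ≤ fuel := by
              simp at hf; omega
            rw [show List.drop (List.length [' ', b]) (c :: c' :: t') = t' from by simp]
            rw [ih t' (List.reverse [b] ++ acc) ht']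
            simp [pvRep, hc.1, hc.2]
          · rw [if_neg hp]
            have ht : t.length ≤ fuel := by simp at hf; omega
            rw [ih t (c :: acc) ht]
            cases t with
            | nil => simp [pvRep]
            | cons d t' =>
                have hnm : ¬ (c = ' ' ∧ d = b) := by
                  intro ⟨h1, h2⟩
                  subst h1; subst h2
                  simp [List.isPrefixOf] at hp
                simp [pvRep, hnm]

theorem pvReplace_eq (b : Char) (l : List Char) :
    PySem.Chars.replace l [' ', b] [b] = pvRep b l := by
  rw [PySem.Chars.replace]
  simp only [List.isEmpty_cons]
  rw [if_neg (by decide)]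
  exact pvGo_eq b l.length l [] (le_refl _)

-- The head of pvRep ']' t is 'M' exactly when the head of t is 'M'.
theorem pvHead_rep (t : List Char) :
    ((pvRep ']' t).head? = some 'M') ↔ (t.head? = some 'M') := by
  match t with
  | [] => simp [pvRep]
  | [c] => simp [pvRep]
  | c :: d :: t' =>
      by_cases h : c = ' ' ∧ d = ']'
      · simp only [pvRep, if_pos h]
        constructor <;> intro hh <;> simp_all
      · simp [pvRep, h]

-- Composing the two replacements gives the lookahead filter (induction on a length bound).
theorem pvRep_comp_bounded (n : Nat) :
    ∀ l : List Char, l.length ≤ n → pvRep 'M' (pvRep ']' l) = pvLook l := by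
  induction n with
  | zero =>
      intro l hl
      have : l = [] := List.length_eq_zero_iff.mp (Nat.le_zero.mp hl)
      subst this; simp [pvRep, pvLook]
  | succ n ih =>
      intro l hl
      match l with
      | [] => simp [pvRep, pvLook]
      | c :: t =>
          by_cases hc : c = ' '
          · subst hc
            match t with
            | [] => simp [pvRep, pvLook]
            | d :: t' =>
              by_cases hd1 : d = ']'
              · subst hd1
                rw [show pvRep ']' (' ' :: ']' :: t') = ']' :: pvRep ']' t' from by simp [pvRep]]
                rw [show pvRep 'M' (']' :: pvRep ']' t') = ']' :: pvRep 'M' (pvRep ']' t') from by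
                  cases h : pvRep ']' t' with
                  | nil => simp [pvRep]
                  | cons x xs => simp [pvRep]]
                rw [ih t' (by simp at hl ⊢; omega)]
                simp [pvLook]
              · by_cases hd2 : d = 'M'
                · subst hd2
                  rw [show pvRep ']' (' ' :: 'M' :: t') = ' ' :: pvRep ']' ('M' :: t') from by
                    simp [pvRep, hd1]]
                  rw [show pvRep ']' ('M' :: t') = 'M' :: pvRep ']' t' from by
                    cases t' with
                    | nil => simp [pvRep]
                    | cons x xs => simp [pvRep]]
                  rw [show pvRep 'M' (' ' :: 'M' :: pvRep ']' t') = 'M' :: pvRep 'M' (pvRep ']' t') from by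
                    simp [pvRep]]
                  rw [ih t' (by simp at hl ⊢; omega)]
                  simp [pvLook]
                · -- space kept: successor is neither ']' nor 'M'
                  rw [show pvRep ']' (' ' :: d :: t') = ' ' :: pvRep ']' (d :: t') from by
                    simp [pvRep, hd1]]
                  have hdM : ((pvRep ']' (d :: t')).head? = some 'M') ↔ False := by
                    rw [pvHead_rep]; simp [hd2]
                  rw [show pvRep 'M' (' ' :: pvRep ']' (d :: t')) = ' ' :: pvRep 'M' (pvRep ']' (d :: t')) from by
                    cases h : pvRep ']' (d :: t') with
                    | nil => simp [pvRep]
                    | cons x xs =>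
                        have : ¬ x = 'M' := by
                          intro hx; exact (hdM.mp (by simp [h, hx]))
                        simp [pvRep, this]]
                  rw [ih (d :: t') (by simp at hl ⊢; omega)]
                  simp [pvLook, hd1, hd2]
          · -- first char not a space: kept by everything
            rw [show pvRep ']' (c :: t) = c :: pvRep ']' t from by
              cases t with
              | nil => simp [pvRep]
              | cons d t' => simp [pvRep, hc]]
            rw [show pvRep 'M' (c :: pvRep ']' t) = c :: pvRep 'M' (pvRep ']' t) from by
              cases h : pvRep ']' t with
              | nil => simp [pvRep]
              | cons x xs => simp [pvRep, hc]]
            rw [ih t (by simp at hl ⊢; omega)]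
            simp [pvLook, hc]

theorem pvRep_comp (l : List Char) : pvRep 'M' (pvRep ']' l) = pvLook l :=
  pvRep_comp_bounded l.length l le_rfl

-- ===== VERDICT (by name: the statement is the Claim_ definition above) =====
theorem remove_space_before_close_bracket_spec : Claim_equal_remove_space_before_close_bracket := by
  intro old _
  unfold Spec_remove_space_before_close_bracket
  unfold remove_space_before_close_bracket remove_space_before_close_bracket_alt
  have hA := pvA_loop old.toList old.toList 0 [] (by simp)
  simp only [Nat.cast_zero] at hA
  simp only [PySem.Str.pyGet?, PySem.Chars.pyGet?_eq_listPyGet?]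
  rw [hA]
  simp only [List.nil_append, Prod.mk.injEq, and_true]
  rw [PySem.Str.replace, PySem.Str.replace]
  have h1 : (" ]" : String).toList = [' ', ']'] := by decide
  have h2 : ("]" : String).toList = [']'] := by decide
  have h3 : (" M" : String).toList = [' ', 'M'] := by decide
  have h4 : ("M" : String).toList = ['M'] := by decide
  rw [h1, h2, pvReplace_eq]
  have h5 : (String.ofList (pvRep ']' old.toList)).toList = pvRep ']' old.toList := by
    simp
  rw [h5, h3, h4, pvReplace_eq, pvRep_comp]
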